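-- pv_equiv track=rewrite | github.com/BeichenZ/Voice-Recognition-For-Cerebral-Palsy | VoiceRecognitionApp/bcfastdtw.py | __expandWindow
-- ===== SOURCE A (Python) =====
-- def __expandWindow(path, len_x, len_y, radius):
--     path_ = set(path)
--     for i, j in path:
--         for a, b in ((i + a, j + b)
--                      for a in range(-radius, radius+1)
--                      for b in range(-radius, radius+1)):
--             path_.add((a, b))
--
--     window_ = set()
--     for i, j in path_:
--         for a, b in ((i * 2, j * 2), (i * 2, j * 2 + 1),
--                      (i * 2 + 1, j * 2), (i * 2 + 1, j * 2 + 1)):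
--             window_.add((a, b))
--
--     window = []
--     start_j = 0
--     for i in range(0, len_x):
--         new_start_j = None
--         for j in range(start_j, len_y):
--             if (i, j) in window_:
--                 window.append((i, j))
--                 if new_start_j is None:
--                     new_start_j = j
--             elif new_start_j is not None:
--                 break
--         start_j = new_start_j
--
--     return window
-- ===== SOURCE B (Python) =====
-- def __expandWindow(path, len_x, len_y, radius):
--     # Expand the path by radius, double the resolution, but index the window
--     # cells per row (sorted column lists) instead of scanning the whole
--     # len_x x len_y grid: per row we jump to the first column >= start_j and
--     # walk the contiguous run directly.
--     offsets = range(-radius, radius + 1)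
--     path_ = set(path) | {(p + a, q + b) for p, q in path for a in offsets for b in offsets}
--     rows = {}
--     for p, q in path_:
--         for i in (2 * p, 2 * p + 1):
--             if 0 <= i < len_x:
--                 for j in (2 * q, 2 * q + 1):
--                     if 0 <= j < len_y:
--                         rows.setdefault(i, set()).add(j)
--     window = []
--     start_j = 0
--     for i in range(len_x):
--         cols = sorted(rows.get(i, ()))
--         n = len(cols)
--         k = 0
--         while k < n and cols[k] < start_j:
--             k += 1
--         if k == n:
--             break  # no window cell in this row at or beyond start_j
--         start_j = cols[k]
--         j = start_j
--         while k < n and cols[k] == j: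
--             window.append((i, cols[k]))
--             k += 1
--             j += 1
--     return window
-- ===== Notes on version B (the rewrite author's own statement) =====
-- stated objective: alternative
-- what changed: B indexes the window cells per row (dict of column sets, each row's columns sorted) and per row jumps to the first column >= start_j and walks the contiguous run, removing A's membership scan over the whole range(start_j, len_y) for every row of the grid.
import Mathlib
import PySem

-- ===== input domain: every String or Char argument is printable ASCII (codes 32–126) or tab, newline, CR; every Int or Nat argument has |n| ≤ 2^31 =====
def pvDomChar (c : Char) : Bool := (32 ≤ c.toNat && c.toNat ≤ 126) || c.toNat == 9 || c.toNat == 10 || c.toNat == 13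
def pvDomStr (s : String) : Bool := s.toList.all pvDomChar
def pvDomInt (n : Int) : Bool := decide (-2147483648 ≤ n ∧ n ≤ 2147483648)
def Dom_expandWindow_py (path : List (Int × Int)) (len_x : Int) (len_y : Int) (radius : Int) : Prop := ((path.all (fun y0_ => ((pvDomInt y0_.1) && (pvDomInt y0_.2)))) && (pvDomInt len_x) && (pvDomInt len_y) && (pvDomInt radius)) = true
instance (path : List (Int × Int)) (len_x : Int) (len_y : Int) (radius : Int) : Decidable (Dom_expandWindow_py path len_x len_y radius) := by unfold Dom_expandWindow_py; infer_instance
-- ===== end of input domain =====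

-- B replaces A's per-row scan over the whole range(start_j, len_y) with per-row sorted column
-- lists of the window cells (skip to the first column >= start_j, walk the contiguous run);
-- equivalence is about the return value (neither version mutates its arguments).

-- ===== PORT A =====
-- path_ = set(path); then add (i+a, j+b) for every path point and offsets a, b in
-- [-radius, radius].  Python's set is a hash set; Std.HashSet is used so that the port,
-- like the Python, does set insertion/membership in O(1) (only membership of these sets
-- is ever observed; their iteration order is not)
def ewPathA (path : List (Int × Int)) (radius : Int) : Std.HashSet (Int × Int) :=
  path.foldl (fun s ij =>
      (PySem.List.pyRange (-radius) (radius + 1) 1).foldl (fun s a =>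
        (PySem.List.pyRange (-radius) (radius + 1) 1).foldl
          (fun s b => s.insert (ij.1 + a, ij.2 + b)) s) s)
    (path.foldl (fun s x => s.insert x) ∅)

-- window_ = set(); add the four doubled-resolution cells of every point of path_
def ewWindowA (path : List (Int × Int)) (radius : Int) : Std.HashSet (Int × Int) :=
  (ewPathA path radius).toList.foldl (fun s ij =>
      [(ij.1 * 2, ij.2 * 2), (ij.1 * 2, ij.2 * 2 + 1),
       (ij.1 * 2 + 1, ij.2 * 2), (ij.1 * 2 + 1, ij.2 * 2 + 1)].foldl
        (fun s c => s.insert c) s)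
    ∅

-- inner loop 'for j in range(start_j, len_y)': appends members, records new_start_j, breaks
-- at the first non-member after a member
def ewInnerA (w : Std.HashSet (Int × Int)) (i : Int) :
    List Int → List (Int × Int) → Option Int → List (Int × Int) × Option Int
  | [], win, ns => (win, ns)
  | j :: js, win, ns =>
    if w.contains (i, j) then
      ewInnerA w i js (win ++ [(i, j)]) (match ns with | none => some j | some v => some v)
    else
      match ns with
      | some _ => (win, ns)   -- break
      | none => ewInnerA w i js win none

-- outer loop 'for i in range(0, len_x)'; when start_j is None Python raises TypeError at
-- range(None, len_y) (excluded by Pre_): the port stops and returns the window built so far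
def ewOuterA (w : Std.HashSet (Int × Int)) (len_y : Int) :
    List Int → List (Int × Int) → Option Int → List (Int × Int)
  | [], win, _ => win
  | i :: is, win, s =>
    match s with
    | none => win   -- Python: TypeError here (outside Pre_)
    | some s =>
      let r := ewInnerA w i (PySem.List.pyRange s len_y 1) win none
      ewOuterA w len_y is r.1 r.2

def expandWindow_py (path : List (Int × Int)) (len_x : Int) (len_y : Int) (radius : Int) : List (Int × Int) :=
  ewOuterA (ewWindowA path radius) len_y (PySem.List.pyRange 0 len_x 1) [] (some 0)

-- ===== PORT B =====
-- path_ = set(path) | {(p+a, q+b) for p, q in path for a in offsets for b in offsets}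
-- (a Python hash set; Std.HashSet keeps the port's set insertion/membership O(1) like the
-- Python's — only membership and the per-row grouping of this set are ever observed)
def ewPathB (path : List (Int × Int)) (radius : Int) : Std.HashSet (Int × Int) :=
  (path.flatMap (fun pq =>
      (PySem.List.pyRange (-radius) (radius + 1) 1).flatMap (fun a =>
        (PySem.List.pyRange (-radius) (radius + 1) 1).map (fun b => (pq.1 + a, pq.2 + b))))).foldl
    (fun s x => s.insert x) (path.foldl (fun s x => s.insert x) ∅)

-- 'rows.setdefault(i, set()).add(j)' guarded by the column bound
def ewColAdd (len_y : Int) (d : PySem.Dict Int (PySem.Set Int)) (i j : Int) :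
    PySem.Dict Int (PySem.Set Int) :=
  if 0 ≤ j ∧ j < len_y then
    PySem.Dict.insert d i (PySem.Set.add (PySem.Dict.getD d i PySem.Set.empty) j)
  else d

-- body of 'for p, q in path_' indexing the in-bounds window cells by row
def ewRowsStep (len_x len_y : Int) (d : PySem.Dict Int (PySem.Set Int)) (pq : Int × Int) :
    PySem.Dict Int (PySem.Set Int) :=
  [2 * pq.1, 2 * pq.1 + 1].foldl (fun d i =>
    if 0 ≤ i ∧ i < len_x then
      [2 * pq.2, 2 * pq.2 + 1].foldl (fun d j => ewColAdd len_y d i j) d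
    else d) d

def ewRowsB (path : List (Int × Int)) (len_x len_y radius : Int) :
    PySem.Dict Int (PySem.Set Int) :=
  (ewPathB path radius).toList.foldl (fun d pq => ewRowsStep len_x len_y d pq) PySem.Dict.empty

-- 'while k < n and cols[k] < start_j: k += 1' — drop the strictly smaller prefix
def ewSkip (s : Int) : List Int → List Int
  | [] => []
  | c :: cs => if c < s then ewSkip s cs else c :: cs

-- 'while k < n and cols[k] == j: window.append((i, cols[k])); k += 1; j += 1'
def ewRun (i : Int) (j : Int) : List Int → List (Int × Int)
  | [] => []
  | c :: cs => if c = j then (i, c) :: ewRun i (j + 1) cs else []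

-- 'for i in range(len_x)' walking each row's sorted column list
def ewOuterB (rows : PySem.Dict Int (PySem.Set Int)) :
    List Int → List (Int × Int) → Int → List (Int × Int)
  | [], win, _ => win
  | i :: is, win, s =>
    let cols := PySem.List.sorted (PySem.Dict.getD rows i PySem.Set.empty) (fun x => x) false
    match ewSkip s cols with
    | [] => win   -- break: no window cell in this row at or beyond start_j
    | c :: cs => ewOuterB rows is (win ++ ewRun i c (c :: cs)) c

def expandWindow_py_alt (path : List (Int × Int)) (len_x : Int) (len_y : Int) (radius : Int) : List (Int × Int) :=
  ewOuterB (ewRowsB path len_x len_y radius) (PySem.List.pyRange 0 len_x 1) [] 0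

-- ===== PRECONDITION & SPEC =====
-- effective expansion radius (a negative radius expands nothing)
def ewE (radius : Int) : Int := max radius 0

-- each path point's (rowLo, rowHi, colLo, colHi) box of in-bounds window cells on the
-- doubled grid, keeping only points with a nonempty column range
def ewPts (path : List (Int × Int)) (len_y e : Int) : List (Int × Int × Int × Int) :=
  (path.map (fun pq => (2 * (pq.1 - e), 2 * (pq.1 + e) + 1,
      max 0 (2 * (pq.2 - e)), min (len_y - 1) (2 * (pq.2 + e) + 1)))).filter
    (fun t => decide (t.2.2.1 ≤ t.2.2.2))

-- the rows ≤ len_x - 2 at which the set of covering boxes can change, ascending, distinct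
def ewBreaks (pts : List (Int × Int × Int × Int)) (len_x : Int) : List Int :=
  PySem.List.sorted
    (PySem.Set.ofList ((0 :: pts.flatMap (fun t => [t.1, t.2.1 + 1])).filter
      (fun b => decide (0 ≤ b ∧ b ≤ len_x - 2))))
    (fun x => x) false

-- greedy start_j evaluated only at the break rows: between breaks the row sets are
-- constant and start_j is stable, so A's scan reaches the last row iff at every break
-- row some covering box still has a column ≥ start_j
def ewGreedy (pts : List (Int × Int × Int × Int)) : List Int → Int → Bool
  | [], _ => true
  | b :: bs, s =>
    match ((pts.filter (fun t => decide (t.1 ≤ b ∧ b ≤ t.2.1 ∧ s ≤ t.2.2.2))).map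
        (fun t => max t.2.2.1 s)).min? with
    | none => false
    | some m => ewGreedy pts bs m

-- Pre_ holds exactly on the inputs where the Python A returns normally: it excludes only
-- the inputs on which A raises TypeError (some row before the last has no window cell at
-- column ≥ start_j, so start_j becomes None and range(None, len_y) fails on the next row);
-- it is decided over the O(|path|) break rows where the window's row sets change, not by
-- replaying A's scan of the grid.
def Pre_expandWindow_py (path : List (Int × Int)) (len_x : Int) (len_y : Int) (radius : Int) : Prop :=
  len_x ≤ 1 ∨
  ewGreedy (ewPts path len_y (ewE radius))
    (ewBreaks (ewPts path len_y (ewE radius)) len_x) 0 = true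

instance (path : List (Int × Int)) (len_x : Int) (len_y : Int) (radius : Int) : Decidable (Pre_expandWindow_py path len_x len_y radius) := by
  unfold Pre_expandWindow_py; infer_instance

def pvWitness_expandWindow_py : (List (Int × Int)) × Int × Int × Int := ([(0, 0), (1, 1)], 4, 4, 0)

def Spec_expandWindow_py (path : List (Int × Int)) (len_x : Int) (len_y : Int) (radius : Int) (out : List (Int × Int)) : Prop := out = expandWindow_py_alt path len_x len_y radius
instance (path : List (Int × Int)) (len_x : Int) (len_y : Int) (radius : Int) (out : List (Int × Int)) : Decidable (Spec_expandWindow_py path len_x len_y radius out) := by unfold Spec_expandWindow_py; infer_instance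

-- ===== CLAIM (what is proved, stated in full; the proofs are below) =====
def Claim_equal_expandWindow_py : Prop := ∀ (path : List (Int × Int)) (len_x : Int) (len_y : Int) (radius : Int), Dom_expandWindow_py path len_x len_y radius → Pre_expandWindow_py path len_x len_y radius → Spec_expandWindow_py path len_x len_y radius (expandWindow_py path len_x len_y radius)

-- ===== LEMMAS AND PROOFS =====

-- the abstract 'point pq is in path_' predicate shared by both ports
def ewPMem (path : List (Int × Int)) (radius : Int) (pq : Int × Int) : Prop :=
  pq ∈ path ∨ ∃ p0 ∈ path, ∃ a ∈ PySem.List.pyRange (-radius) (radius + 1) 1,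
    ∃ b ∈ PySem.List.pyRange (-radius) (radius + 1) 1, pq = (p0.1 + a, p0.2 + b)

-- the four doubled-resolution cells of a path_ point
def ewFour (pq : Int × Int) : List (Int × Int) :=
  [(pq.1 * 2, pq.2 * 2), (pq.1 * 2, pq.2 * 2 + 1),
   (pq.1 * 2 + 1, pq.2 * 2), (pq.1 * 2 + 1, pq.2 * 2 + 1)]

-- the abstract 'cell (i, j) is in window_' predicate
def ewW (path : List (Int × Int)) (radius : Int) (i j : Int) : Prop :=
  ∃ pq, ewPMem path radius pq ∧ (i, j) ∈ ewFour pq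

-- generic membership-through-foldl lemma
theorem mem_foldl_of_step {γ σ : Type} (step : σ → γ → σ) (P : σ → Prop) (Q : γ → Prop)
    (h : ∀ s g, P (step s g) ↔ P s ∨ Q g) :
    ∀ (l : List γ) (s : σ), P (l.foldl step s) ↔ P s ∨ ∃ g ∈ l, Q g := by
  intro l
  induction l with
  | nil => intro s; simp
  | cons g t ih =>
    intro s
    simp only [List.foldl_cons, ih, h, List.mem_cons]
    constructor
    · rintro ((hp | hq) | ⟨g', hg', hq'⟩)
      · exact Or.inl hp
      · exact Or.inr ⟨g, Or.inl rfl, hq⟩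
      · exact Or.inr ⟨g', Or.inr hg', hq'⟩
    · rintro (hp | ⟨g', (rfl | hg'), hq'⟩)
      · exact Or.inl (Or.inl hp)
      · exact Or.inl (Or.inr hq')
      · exact Or.inr ⟨g', hg', hq'⟩

theorem mem_foldl_insert {β : Type} (l : List β) (f : β → Int × Int)
    (s : Std.HashSet (Int × Int)) (x : Int × Int) :
    x ∈ l.foldl (fun s b => s.insert (f b)) s ↔ x ∈ s ∨ ∃ b ∈ l, x = f b := by
  refine mem_foldl_of_step _ (fun s => x ∈ s) (fun b => x = f b) ?_ l s
  intro s g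
  simp only []
  rw [Std.HashSet.mem_insert, beq_iff_eq, eq_comm, or_comm]

theorem mem_ewPathA (path : List (Int × Int)) (radius : Int) (x : Int × Int) :
    x ∈ ewPathA path radius ↔ ewPMem path radius x := by
  have hb : ∀ (s : Std.HashSet (Int × Int)) (ij : Int × Int) (a : Int),
      x ∈ (PySem.List.pyRange (-radius) (radius + 1) 1).foldl
          (fun s b => s.insert (ij.1 + a, ij.2 + b)) s ↔
        x ∈ s ∨ ∃ b ∈ PySem.List.pyRange (-radius) (radius + 1) 1, x = (ij.1 + a, ij.2 + b) :=
    fun s ij a => mem_foldl_insert _ _ _ _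
  have ha : ∀ (s : Std.HashSet (Int × Int)) (ij : Int × Int),
      x ∈ (PySem.List.pyRange (-radius) (radius + 1) 1).foldl
          (fun s a => (PySem.List.pyRange (-radius) (radius + 1) 1).foldl
            (fun s b => s.insert (ij.1 + a, ij.2 + b)) s) s ↔
        x ∈ s ∨ ∃ a ∈ PySem.List.pyRange (-radius) (radius + 1) 1,
          ∃ b ∈ PySem.List.pyRange (-radius) (radius + 1) 1, x = (ij.1 + a, ij.2 + b) :=
    fun s ij => mem_foldl_of_step _ (fun s => x ∈ s) _ (fun s a => hb s ij a) _ s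
  have h := mem_foldl_of_step _ (fun s => x ∈ s)
      (fun ij => ∃ a ∈ PySem.List.pyRange (-radius) (radius + 1) 1,
        ∃ b ∈ PySem.List.pyRange (-radius) (radius + 1) 1, x = (ij.1 + a, ij.2 + b))
      (fun s ij => ha s ij) path (path.foldl (fun s x => s.insert x) ∅)
  unfold ewPathA ewPMem
  rw [h]
  have hbase := mem_foldl_insert path (fun x => x) ∅ x
  simp only [Std.HashSet.not_mem_empty, false_or] at hbase
  rw [hbase]
  constructor
  · rintro (⟨p, hp, rfl⟩ | h)
    · exact Or.inl hp
    · exact Or.inr h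
  · rintro (hp | h)
    · exact Or.inl ⟨x, hp, rfl⟩
    · exact Or.inr h

theorem mem_ewWindowA (path : List (Int × Int)) (radius : Int) (i j : Int) :
    (i, j) ∈ ewWindowA path radius ↔ ewW path radius i j := by
  have hin : ∀ (s : Std.HashSet (Int × Int)) (ij : Int × Int),
      (i, j) ∈ (ewFour ij).foldl (fun s c => s.insert c) s ↔
        (i, j) ∈ s ∨ ∃ c ∈ ewFour ij, (i, j) = c := by
    intro s ij
    exact mem_foldl_insert (ewFour ij) (fun c => c) s (i, j)
  have h := mem_foldl_of_step _ (fun s => (i, j) ∈ s)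
      (fun ij => ∃ c ∈ ewFour ij, (i, j) = c) hin (ewPathA path radius).toList ∅
  unfold ewWindowA ewW
  have hfour : ∀ ij : Int × Int,
      [(ij.1 * 2, ij.2 * 2), (ij.1 * 2, ij.2 * 2 + 1),
       (ij.1 * 2 + 1, ij.2 * 2), (ij.1 * 2 + 1, ij.2 * 2 + 1)] = ewFour ij := fun _ => rfl
  simp only [hfour]
  rw [h]
  simp only [Std.HashSet.not_mem_empty, false_or, Std.HashSet.mem_toList]
  constructor
  · rintro ⟨pq, hpq, c, hc, rfl⟩
    exact ⟨pq, (mem_ewPathA path radius pq).1 hpq, hc⟩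
  · rintro ⟨pq, hpq, hc⟩
    exact ⟨pq, (mem_ewPathA path radius pq).2 hpq, (i, j), hc, rfl⟩

theorem mem_ewPathB (path : List (Int × Int)) (radius : Int) (x : Int × Int) :
    x ∈ ewPathB path radius ↔ ewPMem path radius x := by
  unfold ewPathB ewPMem
  rw [mem_foldl_insert _ (fun x => x)]
  have hbase := mem_foldl_insert path (fun x => x) ∅ x
  simp only [Std.HashSet.not_mem_empty, false_or] at hbase
  rw [hbase]
  simp only [List.mem_flatMap, List.mem_map]
  constructor
  · rintro (⟨b0, hb0, rfl⟩ | ⟨b0, ⟨p, hp, a, ha, b, hb, rfl⟩, rfl⟩)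
    · exact Or.inl hb0
    · exact Or.inr ⟨p, hp, a, ha, b, hb, rfl⟩
  · rintro (h | ⟨p, hp, a, ha, b, hb, rfl⟩)
    · exact Or.inl ⟨x, h, rfl⟩
    · exact Or.inr ⟨(p.1 + a, p.2 + b), ⟨p, hp, a, ha, b, hb, rfl⟩, rfl⟩

-- cell contributed by one path_ point, with both bounds
def ewCellB (len_x len_y : Int) (pq : Int × Int) (i j : Int) : Prop :=
  (i = 2 * pq.1 ∨ i = 2 * pq.1 + 1) ∧ 0 ≤ i ∧ i < len_x ∧
  (j = 2 * pq.2 ∨ j = 2 * pq.2 + 1) ∧ 0 ≤ j ∧ j < len_y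

theorem getD_ewColAdd (len_y : Int) (d : PySem.Dict Int (PySem.Set Int)) (i0 j0 i : Int) :
    PySem.Dict.getD (ewColAdd len_y d i0 j0) i PySem.Set.empty =
      if 0 ≤ j0 ∧ j0 < len_y ∧ i = i0 then
        PySem.Set.add (PySem.Dict.getD d i0 PySem.Set.empty) j0
      else PySem.Dict.getD d i PySem.Set.empty := by
  unfold ewColAdd
  split_ifs with h1 h2 h3
  · rcases h2 with ⟨-, -, rfl⟩
    rw [PySem.Dict.getD_insert]
    simp
  · rw [PySem.Dict.getD_insert]
    have : ¬ i = i0 := fun h => h2 ⟨h1.1, h1.2, h⟩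
    simp [this]
  · exact absurd ⟨h3.1, h3.2.1⟩ h1
  · rfl

theorem mem_getD_ewColAdd (len_y : Int) (d : PySem.Dict Int (PySem.Set Int)) (i0 j0 i j : Int) :
    j ∈ PySem.Dict.getD (ewColAdd len_y d i0 j0) i PySem.Set.empty ↔
      j ∈ PySem.Dict.getD d i PySem.Set.empty ∨ (i = i0 ∧ j = j0 ∧ 0 ≤ j0 ∧ j0 < len_y) := by
  rw [getD_ewColAdd]
  split_ifs with h
  · rcases h with ⟨hb1, hb2, rfl⟩
    rw [PySem.Set.mem_add]
    tauto
  · tauto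

theorem mem_getD_ewRowsStep (len_x len_y : Int) (d : PySem.Dict Int (PySem.Set Int))
    (pq : Int × Int) (i j : Int) :
    j ∈ PySem.Dict.getD (ewRowsStep len_x len_y d pq) i PySem.Set.empty ↔
      j ∈ PySem.Dict.getD d i PySem.Set.empty ∨ ewCellB len_x len_y pq i j := by
  rcases pq with ⟨p, q⟩
  simp only [ewRowsStep, List.foldl_cons, List.foldl_nil]
  split_ifs <;>
    (simp only [mem_getD_ewColAdd, ewCellB]
     by_cases hM : j ∈ PySem.Dict.getD d i PySem.Set.empty <;>
       simp only [hM, true_or, or_true, true_iff, iff_true, false_or, or_false,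
         false_iff, iff_false, not_or] <;> try omega)

theorem nodup_getD_ewRowsStep (len_x len_y : Int) (d : PySem.Dict Int (PySem.Set Int))
    (pq : Int × Int) (h : ∀ i, (PySem.Dict.getD d i PySem.Set.empty).Nodup) :
    ∀ i, (PySem.Dict.getD (ewRowsStep len_x len_y d pq) i PySem.Set.empty).Nodup := by
  intro i
  rcases pq with ⟨p, q⟩
  simp only [ewRowsStep, List.foldl_cons, List.foldl_nil]
  split_ifs <;> (try simp only [getD_ewColAdd]) <;> (try split_ifs) <;>
    (repeat' apply PySem.Set.nodup_add) <;> exact h _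

theorem mem_getD_ewRowsB (path : List (Int × Int)) (len_x len_y radius : Int) (i j : Int) :
    j ∈ PySem.Dict.getD (ewRowsB path len_x len_y radius) i PySem.Set.empty ↔
      ∃ pq, ewPMem path radius pq ∧ ewCellB len_x len_y pq i j := by
  unfold ewRowsB
  rw [mem_foldl_of_step _ (fun d => j ∈ PySem.Dict.getD d i PySem.Set.empty)
      (fun pq => ewCellB len_x len_y pq i j)
      (fun d pq => mem_getD_ewRowsStep len_x len_y d pq i j)]
  rw [PySem.Dict.getD_empty]
  simp only [PySem.Set.empty, List.not_mem_nil, false_or, Std.HashSet.mem_toList]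
  constructor
  · rintro ⟨pq, hpq, hc⟩
    exact ⟨pq, (mem_ewPathB path radius pq).1 hpq, hc⟩
  · rintro ⟨pq, hpq, hc⟩
    exact ⟨pq, (mem_ewPathB path radius pq).2 hpq, hc⟩

theorem nodup_getD_ewRowsB (path : List (Int × Int)) (len_x len_y radius : Int) (i : Int) :
    (PySem.Dict.getD (ewRowsB path len_x len_y radius) i PySem.Set.empty).Nodup := by
  unfold ewRowsB
  have : ∀ (l : List (Int × Int)) (d : PySem.Dict Int (PySem.Set Int)),
      (∀ i, (PySem.Dict.getD d i PySem.Set.empty).Nodup) →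
      ∀ i, (PySem.Dict.getD (l.foldl (fun d pq => ewRowsStep len_x len_y d pq) d) i
        PySem.Set.empty).Nodup := by
    intro l
    induction l with
    | nil => intro d hd; exact hd
    | cons pq t ih =>
      intro d hd
      exact ih _ (nodup_getD_ewRowsStep len_x len_y d pq hd)
  refine this _ _ ?_ i
  intro i'
  rw [PySem.Dict.getD_empty]
  exact List.nodup_nil

-- the sorted per-row column list: strictly increasing, with exactly the in-bounds window columns
def ewCols (path : List (Int × Int)) (len_x len_y radius i : Int) : List Int :=
  PySem.List.sorted (PySem.Dict.getD (ewRowsB path len_x len_y radius) i PySem.Set.empty)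
    (fun x => x) false

theorem pairwise_ewCols (path : List (Int × Int)) (len_x len_y radius i : Int) :
    (ewCols path len_x len_y radius i).Pairwise (· < ·) := by
  unfold ewCols
  have hperm := PySem.List.sorted_perm
    (PySem.Dict.getD (ewRowsB path len_x len_y radius) i PySem.Set.empty) (fun x => x) false
  have hnd : (PySem.List.sorted
      (PySem.Dict.getD (ewRowsB path len_x len_y radius) i PySem.Set.empty)
      (fun x => x) false).Nodup :=
    hperm.nodup_iff.mpr (nodup_getD_ewRowsB path len_x len_y radius i)
  have hle := PySem.List.sorted_pairwise
    (PySem.Dict.getD (ewRowsB path len_x len_y radius) i PySem.Set.empty) (fun x => x)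
  exact (hle.and hnd).imp (fun h => lt_of_le_of_ne h.1 h.2)

theorem mem_ewCols (path : List (Int × Int)) (len_x len_y radius i : Int)
    (h0 : 0 ≤ i) (h1 : i < len_x) (j : Int) :
    j ∈ ewCols path len_x len_y radius i ↔ 0 ≤ j ∧ j < len_y ∧ ewW path radius i j := by
  unfold ewCols
  rw [PySem.List.mem_sorted, mem_getD_ewRowsB]
  constructor
  · rintro ⟨pq, hp, hi, hi0, hix, hj, hj0, hjy⟩
    refine ⟨hj0, hjy, pq, hp, ?_⟩
    simp only [ewFour, List.mem_cons, List.not_mem_nil, or_false, Prod.mk.injEq]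
    omega
  · rintro ⟨hj0, hjy, pq, hp, hfour⟩
    refine ⟨pq, hp, ?_⟩
    simp only [ewFour, List.mem_cons, List.not_mem_nil, or_false, Prod.mk.injEq] at hfour
    unfold ewCellB
    omega

-- two strictly increasing integer lists with the same members are equal
theorem sorted_lt_eq_of_mem_iff :
    ∀ (L1 L2 : List Int), L1.Pairwise (· < ·) → L2.Pairwise (· < ·) →
      (∀ x, x ∈ L1 ↔ x ∈ L2) → L1 = L2 := by
  intro L1
  induction L1 with
  | nil =>
    intro L2 _ _ hm
    cases L2 with
    | nil => rfl
    | cons b u => exact absurd ((hm b).2 (List.mem_cons_self)) (List.not_mem_nil (a := b))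
  | cons a t ih =>
    intro L2 h1 h2 hm
    cases L2 with
    | nil => exact absurd ((hm a).1 (List.mem_cons_self)) (List.not_mem_nil (a := a))
    | cons b u =>
      obtain ⟨ha1, ht1⟩ := List.pairwise_cons.1 h1
      obtain ⟨hb2, hu2⟩ := List.pairwise_cons.1 h2
      have hab : a = b := by
        have ha2 := (hm a).1 (List.mem_cons_self)
        have hb1 := (hm b).2 (List.mem_cons_self)
        rcases List.mem_cons.1 ha2 with h | h
        · exact h
        · rcases List.mem_cons.1 hb1 with h' | h'
          · exact h'.symm
          · have := hb2 a h
            have := ha1 b h'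
            omega
      subst hab
      have htu : ∀ x, x ∈ t ↔ x ∈ u := by
        intro x
        constructor
        · intro hx
          rcases List.mem_cons.1 ((hm x).1 (List.mem_cons_of_mem a hx)) with rfl | h
          · exact absurd (ha1 x hx) (lt_irrefl x)
          · exact h
        · intro hx
          rcases List.mem_cons.1 ((hm x).2 (List.mem_cons_of_mem a hx)) with rfl | h
          · exact absurd (hb2 x hx) (lt_irrefl x)
          · exact h
      rw [ih u ht1 hu2 htu]

theorem ewSkip_eq_dropWhile (s : Int) (L : List Int) :
    ewSkip s L = L.dropWhile (fun c => decide (c < s)) := by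
  induction L with
  | nil => rfl
  | cons c cs ih => by_cases h : c < s <;> simp [ewSkip, List.dropWhile, h, ih]

theorem mem_ewSkip (s : Int) (L : List Int) (hL : L.Pairwise (· < ·)) (x : Int) :
    x ∈ ewSkip s L ↔ x ∈ L ∧ s ≤ x := by
  induction L with
  | nil => simp [ewSkip]
  | cons c cs ih =>
    obtain ⟨hc, ht⟩ := List.pairwise_cons.1 hL
    by_cases h : c < s
    · rw [ewSkip, if_pos h, ih ht]
      constructor
      · rintro ⟨hx, hs⟩
        exact ⟨List.mem_cons_of_mem _ hx, hs⟩
      · rintro ⟨hx, hs⟩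
        rcases List.mem_cons.1 hx with rfl | hx'
        · omega
        · exact ⟨hx', hs⟩
    · rw [ewSkip, if_neg h]
      constructor
      · intro hx
        rcases List.mem_cons.1 hx with rfl | hx'
        · exact ⟨List.mem_cons_self, by omega⟩
        · have := hc x hx'
          exact ⟨List.mem_cons_of_mem _ hx', by omega⟩
      · rintro ⟨hx, _⟩
        exact hx

theorem pairwise_ewSkip (s : Int) (L : List Int) (hL : L.Pairwise (· < ·)) :
    (ewSkip s L).Pairwise (· < ·) := by
  rw [ewSkip_eq_dropWhile]
  exact hL.sublist (List.dropWhile_sublist _)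

theorem ewRun_nil_of_gt (i s : Int) (F : List Int) (h : ∀ x ∈ F, s < x) :
    ewRun i s F = [] := by
  cases F with
  | nil => rfl
  | cons c cs =>
    have := h c (List.mem_cons_self)
    rw [ewRun, if_neg (by omega)]

theorem ewInnerA_some (w : Std.HashSet (Int × Int)) (i len_y : Int) :
    ∀ (s : Int) (win : List (Int × Int)) (v : Int),
      ewInnerA w i (PySem.List.pyRange s len_y 1) win (some v) =
        (win ++ ewRun i s ((PySem.List.pyRange s len_y 1).filter
            (fun j => w.contains (i, j))), some v) := by
  intro s win v
  suffices H : ∀ (n : Nat) (s : Int), (len_y - s).toNat ≤ n → ∀ win,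
      ewInnerA w i (PySem.List.pyRange s len_y 1) win (some v) =
        (win ++ ewRun i s ((PySem.List.pyRange s len_y 1).filter
            (fun j => w.contains (i, j))), some v) by
    exact H (len_y - s).toNat s le_rfl win
  intro n
  induction n with
  | zero =>
    intro s hn win
    rw [PySem.List.pyRange_one_eq_nil (by omega)]
    simp [ewInnerA, ewRun]
  | succ n ih =>
    intro s hn win
    by_cases hlt : s < len_y
    · rw [PySem.List.pyRange_one_cons hlt]
      by_cases hq : w.contains (i, s) = true
      · rw [ewInnerA, if_pos hq]
        simp only [List.filter_cons]
        rw [if_pos hq, ewRun, if_pos rfl]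
        rw [ih (s + 1) (by omega) (win ++ [(i, s)])]
        simp
      · rw [ewInnerA, if_neg hq]
        simp only [List.filter_cons]
        rw [if_neg hq]
        have hrun : ewRun i s ((PySem.List.pyRange (s + 1) len_y 1).filter
            (fun j => w.contains (i, j))) = [] := by
          apply ewRun_nil_of_gt
          intro x hx
          have := (PySem.List.mem_pyRange_one).1 (List.mem_of_mem_filter hx)
          omega
        rw [hrun]
        simp
    · rw [PySem.List.pyRange_one_eq_nil (by omega)]
      simp [ewInnerA, ewRun]

theorem ewInnerA_none (w : Std.HashSet (Int × Int)) (i len_y : Int) :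
    ∀ (s : Int) (win : List (Int × Int)),
      ewInnerA w i (PySem.List.pyRange s len_y 1) win none =
        (match (PySem.List.pyRange s len_y 1).filter (fun j => w.contains (i, j)) with
         | [] => (win, none)
         | c :: cs => (win ++ ewRun i c (c :: cs), some c)) := by
  suffices H : ∀ (n : Nat) (s : Int), (len_y - s).toNat ≤ n → ∀ win,
      ewInnerA w i (PySem.List.pyRange s len_y 1) win none =
        (match (PySem.List.pyRange s len_y 1).filter (fun j => w.contains (i, j)) with
         | [] => (win, none)
         | c :: cs => (win ++ ewRun i c (c :: cs), some c)) by
    intro s win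
    exact H (len_y - s).toNat s le_rfl win
  intro n
  induction n with
  | zero =>
    intro s hn win
    rw [PySem.List.pyRange_one_eq_nil (by omega)]
    simp [ewInnerA]
  | succ n ih =>
    intro s hn win
    by_cases hlt : s < len_y
    · rw [PySem.List.pyRange_one_cons hlt]
      by_cases hq : w.contains (i, s) = true
      · rw [ewInnerA, if_pos hq]
        simp only [List.filter_cons]
        rw [if_pos hq]
        rw [ewInnerA_some w i len_y (s + 1) (win ++ [(i, s)]) s]
        simp [ewRun]
      · rw [ewInnerA, if_neg hq]
        simp only [List.filter_cons]
        rw [if_neg hq]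
        exact ih (s + 1) (by omega) win
    · rw [PySem.List.pyRange_one_eq_nil (by omega)]
      simp [ewInnerA]

theorem ewOuterA_none (w : Std.HashSet (Int × Int)) (len_y : Int) (is : List Int)
    (win : List (Int × Int)) : ewOuterA w len_y is win none = win := by
  cases is <;> rfl

-- per-row bridge: skipping in the sorted column list = filtering the scanned range
theorem ewSkip_eq_filter (path : List (Int × Int)) (len_x len_y radius i s : Int)
    (h0 : 0 ≤ i) (h1 : i < len_x) (hs : 0 ≤ s) :
    ewSkip s (ewCols path len_x len_y radius i) =
      (PySem.List.pyRange s len_y 1).filter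
        (fun j => (ewWindowA path radius).contains (i, j)) := by
  have hc : ∀ x : Int,
      ((ewWindowA path radius).contains (i, x) = true) ↔ ewW path radius i x :=
    fun x => (Std.HashSet.contains_iff_mem).trans (mem_ewWindowA path radius i x)
  apply sorted_lt_eq_of_mem_iff
  · exact pairwise_ewSkip _ _ (pairwise_ewCols path len_x len_y radius i)
  · exact (PySem.List.pairwise_lt_pyRange_one _ _).filter _
  · intro x
    rw [mem_ewSkip _ _ (pairwise_ewCols path len_x len_y radius i),
      mem_ewCols path len_x len_y radius i h0 h1, List.mem_filter,
      PySem.List.mem_pyRange_one]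
    constructor
    · rintro ⟨⟨hx0, hxy, hw⟩, hsx⟩
      exact ⟨⟨hsx, hxy⟩, (hc x).2 hw⟩
    · rintro ⟨⟨hsx, hxy⟩, hq⟩
      exact ⟨⟨by omega, hxy, (hc x).1 hq⟩, hsx⟩

theorem ewOuter_eq (path : List (Int × Int)) (len_x len_y radius : Int) :
    ∀ (rl : List Int) (win : List (Int × Int)) (s : Int), 0 ≤ s →
      (∀ i ∈ rl, 0 ≤ i ∧ i < len_x) →
      ewOuterA (ewWindowA path radius) len_y rl win (some s) =
        ewOuterB (ewRowsB path len_x len_y radius) rl win s := by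
  intro rl
  induction rl with
  | nil =>
    intro win s _ _
    rfl
  | cons i is ih =>
    intro win s hs hmem
    obtain ⟨hi0, hix⟩ := hmem i (List.mem_cons_self)
    have hcols : PySem.List.sorted
        (PySem.Dict.getD (ewRowsB path len_x len_y radius) i PySem.Set.empty)
        (fun x => x) false = ewCols path len_x len_y radius i := rfl
    have hf := ewSkip_eq_filter path len_x len_y radius i s hi0 hix hs
    rw [ewOuterA, ewOuterB, hcols]
    rw [ewInnerA_none, ← hf]
    cases hcase : ewSkip s (ewCols path len_x len_y radius i) with
    | nil =>
      exact ewOuterA_none _ _ _ _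
    | cons c cs =>
      have hcmem : c ∈ ewSkip s (ewCols path len_x len_y radius i) := by
        rw [hcase]; exact List.mem_cons_self
      have hc0 : 0 ≤ c := by
        have := (mem_ewSkip s _ (pairwise_ewCols path len_x len_y radius i) c).1 hcmem
        omega
      exact ih _ c hc0 (fun i' hi' => hmem i' (List.mem_cons_of_mem _ hi'))

theorem ew_ports_eq (path : List (Int × Int)) (len_x len_y radius : Int) :
    expandWindow_py path len_x len_y radius = expandWindow_py_alt path len_x len_y radius := by
  unfold expandWindow_py expandWindow_py_alt
  refine ewOuter_eq path len_x len_y radius _ [] 0 le_rfl ?_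
  intro i hi
  rw [PySem.List.mem_pyRange_one] at hi
  exact hi

-- ===== VERDICT (by name: the statement is the Claim_ definition above) =====
theorem expandWindow_py_spec : Claim_equal_expandWindow_py := by
  intro path len_x len_y radius _ _
  unfold Spec_expandWindow_py
  exact ew_ports_eq path len_x len_y radius
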